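-- pv_equiv track=rewrite | github.com/strewen/HW | Group_Judge.py | have_eve_inverse
-- ===== SOURCE A (Python) =====
-- def have_eve_inverse(data_set,number):
--     data=[]
--     for i in data_set:
--         for j in data_set:
--             if ((i*j)%number==1):
--                 data.append(i)
--                 data.append(j)
--     data=list(set(data)) #去重
--     data.sort()  #排序
--     if(data==data_set):
--         return True
--     else:
--         return False
-- ===== SOURCE B (Python) =====
-- def have_eve_inverse(data_set, number):
--     return data_set == sorted(set(data_set)) and all(
--         any((i * j) % number == 1 for j in data_set) for i in data_set)
-- ===== Notes on version B (the rewrite author's own statement) =====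
-- stated objective: simpler
-- what changed: Replaces A's build-a-list-of-all-invertible-pair-members / dedup / sort / compare pipeline with two direct short-circuiting predicates: the input equals its own sorted dedup (canonical form) and every element has an in-set inverse mod number.
import Mathlib
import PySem

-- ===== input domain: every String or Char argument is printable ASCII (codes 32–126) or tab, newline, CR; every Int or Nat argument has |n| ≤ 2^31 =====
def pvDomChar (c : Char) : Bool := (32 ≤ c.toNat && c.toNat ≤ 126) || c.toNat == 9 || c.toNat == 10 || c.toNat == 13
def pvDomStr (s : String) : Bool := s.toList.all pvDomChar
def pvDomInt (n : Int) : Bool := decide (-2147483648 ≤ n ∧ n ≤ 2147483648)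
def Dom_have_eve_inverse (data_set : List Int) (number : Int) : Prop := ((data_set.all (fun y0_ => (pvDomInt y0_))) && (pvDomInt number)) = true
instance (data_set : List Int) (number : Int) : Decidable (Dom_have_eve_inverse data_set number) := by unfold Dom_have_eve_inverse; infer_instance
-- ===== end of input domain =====

-- B replaces A's collect-invertible-pairs/dedup/sort/compare pipeline by two direct
-- predicates (input is its own sorted dedup, and every element has an in-set inverse);
-- objective: simpler.

-- ===== PORT A =====
def have_eve_inverse (data_set : List Int) (number : Int) : Bool :=
  let data : List Int :=
    data_set.foldl (fun data i =>
      data_set.foldl (fun data j =>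
        if PySem.Int.mod (i * j) number == 1 then data ++ [i] ++ [j] else data) data) []
  let data := PySem.List.sorted (PySem.Set.ofList data) (fun x => x) false
  if data == data_set then true else false

-- ===== PORT B =====
def have_eve_inverse_alt (data_set : List Int) (number : Int) : Bool :=
  (data_set == PySem.List.sorted (PySem.Set.ofList data_set) (fun x => x) false)
    && data_set.all (fun i => data_set.any (fun j => PySem.Int.mod (i * j) number == 1))

-- ===== PRECONDITION & SPEC =====
-- Pre_ excludes exactly the inputs where Python A raises ZeroDivisionError:
-- number = 0 with a nonempty data_set (the '% number' is then evaluated).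
def Pre_have_eve_inverse (data_set : List Int) (number : Int) : Prop :=
  data_set = [] ∨ number ≠ 0
instance (data_set : List Int) (number : Int) : Decidable (Pre_have_eve_inverse data_set number) := by
  unfold Pre_have_eve_inverse; infer_instance
def pvWitness_have_eve_inverse : List Int × Int := ([1, 2, 3, 4], 5)

def Spec_have_eve_inverse (data_set : List Int) (number : Int) (out : Bool) : Prop := out = have_eve_inverse_alt data_set number
instance (data_set : List Int) (number : Int) (out : Bool) : Decidable (Spec_have_eve_inverse data_set number out) := by unfold Spec_have_eve_inverse; infer_instance

-- ===== CLAIM (what is proved, stated in full; the proofs are below) =====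
def Claim_equal_have_eve_inverse : Prop := ∀ (data_set : List Int) (number : Int), Dom_have_eve_inverse data_set number → Pre_have_eve_inverse data_set number → Spec_have_eve_inverse data_set number (have_eve_inverse data_set number)

-- ===== LEMMAS AND PROOFS =====

-- the inner-loop/outer-loop accumulation of A, as a flatMap
theorem pvA_data_eq (data_set : List Int) (number : Int) :
    data_set.foldl (fun data i =>
      data_set.foldl (fun data j =>
        if PySem.Int.mod (i * j) number == 1 then data ++ [i] ++ [j] else data) data) [] =
    data_set.flatMap (fun i => data_set.flatMap (fun j =>
      if PySem.Int.mod (i * j) number == 1 then [i, j] else [])) := by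
  have hinner : ∀ (i : Int) (acc : List Int),
      data_set.foldl (fun data j =>
        if PySem.Int.mod (i * j) number == 1 then data ++ [i] ++ [j] else data) acc =
      acc ++ data_set.flatMap (fun j =>
        if PySem.Int.mod (i * j) number == 1 then [i, j] else []) := by
    intro i acc
    induction data_set generalizing acc with
    | nil => simp
    | cons j t ih =>
      simp only [List.foldl_cons, List.flatMap_cons, ih]
      split <;> simp
  calc data_set.foldl (fun data i =>
      data_set.foldl (fun data j =>
        if PySem.Int.mod (i * j) number == 1 then data ++ [i] ++ [j] else data) data) []
      = data_set.foldl (fun data i => data ++ data_set.flatMap (fun j =>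
          if PySem.Int.mod (i * j) number == 1 then [i, j] else [])) [] := by
        apply PySem.List.foldl_congr_mem
        intro acc x _
        exact hinner x acc
    _ = _ := by
        rw [PySem.List.foldl_append_eq_flatMap]; simp

-- membership in A's collected list: x occurs iff x is in data_set and has an in-set inverse
theorem pvMem_data (data_set : List Int) (number : Int) (x : Int) :
    (x ∈ data_set.flatMap (fun i => data_set.flatMap (fun j =>
        if PySem.Int.mod (i * j) number == 1 then [i, j] else []))) ↔
    (x ∈ data_set ∧ ∃ j ∈ data_set, PySem.Int.mod (x * j) number = 1) := by
  constructor
  · rintro h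
    simp only [List.mem_flatMap] at h
    obtain ⟨i, hi, j, hj, hx⟩ := h
    split at hx
    · rename_i hc
      simp only [beq_iff_eq] at hc
      simp only [List.mem_cons, List.not_mem_nil, or_false] at hx
      rcases hx with hx | hx
      · exact ⟨hx ▸ hi, j, hj, by rwa [hx]⟩
      · refine ⟨hx ▸ hj, i, hi, ?_⟩
        rw [hx, Int.mul_comm]; exact hc
    · cases hx
  · rintro ⟨hx, j, hj, hc⟩
    simp only [List.mem_flatMap]
    exact ⟨x, hx, j, hj, by simp [hc]⟩

-- ===== VERDICT (by name: the statement is the Claim_ definition above) =====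
-- A returns true iff sorted(set(data)) equals the input
theorem pvA_iff (data_set : List Int) (number : Int) :
    have_eve_inverse data_set number = true ↔
    PySem.List.sorted (PySem.Set.ofList
        (data_set.flatMap (fun i => data_set.flatMap (fun j =>
          if PySem.Int.mod (i * j) number == 1 then [i, j] else []))))
      (fun x => x) false = data_set := by
  unfold have_eve_inverse
  simp only [pvA_data_eq]
  split <;> rename_i h <;> simp_all

-- B returns true iff the input is its own sorted dedup and every element has an in-set inverse
theorem pvB_iff (data_set : List Int) (number : Int) :
    have_eve_inverse_alt data_set number = true ↔
    (data_set = PySem.List.sorted (PySem.Set.ofList data_set) (fun x => x) false ∧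
     ∀ i ∈ data_set, ∃ j ∈ data_set, PySem.Int.mod (i * j) number = 1) := by
  unfold have_eve_inverse_alt
  simp [List.all_eq_true, List.any_eq_true]

theorem have_eve_inverse_spec : Claim_equal_have_eve_inverse := by
  intro data_set number _ _
  unfold Spec_have_eve_inverse
  rw [Bool.eq_iff_iff, pvA_iff, pvB_iff]
  set data := data_set.flatMap (fun i => data_set.flatMap (fun j =>
      if PySem.Int.mod (i * j) number == 1 then [i, j] else [])) with hdata
  constructor
  · intro h
    have hpw : data_set.Pairwise (· < ·) := by
      rw [← h]; exact PySem.List.sorted_ofList_pairwise_lt data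
    have hnd : data_set.Nodup := hpw.imp fun hlt => ne_of_lt hlt
    have hinv : ∀ i ∈ data_set, ∃ j ∈ data_set, PySem.Int.mod (i * j) number = 1 := by
      intro i hi
      have : i ∈ PySem.Set.ofList data := by
        rw [← PySem.List.mem_sorted (key := fun x => x) (rev := false), h]
        exact hi
      rw [PySem.Set.mem_ofList, pvMem_data] at this
      exact this.2
    refine ⟨?_, hinv⟩
    have hperm : data_set.Perm (PySem.Set.ofList data_set) := by
      rw [List.perm_ext_iff_of_nodup hnd (PySem.Set.nodup_ofList data_set)]
      intro a; rw [PySem.Set.mem_ofList]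
    exact (PySem.List.sorted_eq_of_perm_of_pairwise_lt _ _ (fun x => x) hperm hpw).symm
  · rintro ⟨h1, hinv⟩
    have hpw : data_set.Pairwise (· < ·) := by
      rw [h1]; exact PySem.List.sorted_ofList_pairwise_lt data_set
    have hnd : data_set.Nodup := hpw.imp fun hlt => ne_of_lt hlt
    have hperm : data_set.Perm (PySem.Set.ofList data) := by
      rw [List.perm_ext_iff_of_nodup hnd (PySem.Set.nodup_ofList data)]
      intro a
      rw [PySem.Set.mem_ofList, hdata, pvMem_data]
      constructor
      · intro ha; exact ⟨ha, hinv a ha⟩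
      · exact fun h => h.1
    exact PySem.List.sorted_eq_of_perm_of_pairwise_lt _ _ (fun x => x) hperm hpw
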